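-- pv_equiv track=rewrite | github.com/hayleymathews/data_structures_and_algorithms | Searching_and_Sorting/text.py | find_pattern_knuth_morris_pratt
-- ===== SOURCE A (Python) =====
-- def find_pattern_knuth_morris_pratt(text, pattern):
--     """
--     knuth morris pratt algorithm to find first index of pattern in text O(n + m)
--     >>> text, pattern = 'atcggctatt', 'tat'
--     >>> Text.find_pattern_knuth_morris_pratt(text, pattern)
--     6
--     """
--     n, m = len(text), len(pattern)
--     if not text or not pattern:
--         return 0
--     fail = [0] * m
--     j = 1
--     k = 0
--     while j < m:
--         if pattern[j] == pattern[k]: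
--             fail[j] = k + 1
--             j += 1
--             k += 1
--         elif k > 0:
--             k = fail[k - 1]
--         else:
--             j += 1
--     j = 0
--     k = 0
--     while j < n:
--         if text[j] == pattern[k]:
--             if k == m - 1:
--                 return j - m + 1
--             j += 1
--             k += 1
--         elif k > 0:
--             k = fail[k - 1]
--         else:
--             j += 1
--     return -1
-- ===== SOURCE B (Python) =====
-- def find_pattern_knuth_morris_pratt(text, pattern):
--     """Naive brute-force scan instead of KMP: try every start index in order."""
--     if not text or not pattern:
--         return 0
--     n, m = len(text), len(pattern)
--     for i in range(n + 1 - m):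
--         if text[i:i + m] == pattern:
--             return i
--     return -1
-- ===== Notes on version B (the rewrite author's own statement) =====
-- stated objective: simpler
-- what changed: Replaced the KMP failure-table precomputation and two stateful while-loops by a plain brute-force scan that tries each start index in order and compares a slice, returning the first full match or -1.
import Mathlib
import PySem

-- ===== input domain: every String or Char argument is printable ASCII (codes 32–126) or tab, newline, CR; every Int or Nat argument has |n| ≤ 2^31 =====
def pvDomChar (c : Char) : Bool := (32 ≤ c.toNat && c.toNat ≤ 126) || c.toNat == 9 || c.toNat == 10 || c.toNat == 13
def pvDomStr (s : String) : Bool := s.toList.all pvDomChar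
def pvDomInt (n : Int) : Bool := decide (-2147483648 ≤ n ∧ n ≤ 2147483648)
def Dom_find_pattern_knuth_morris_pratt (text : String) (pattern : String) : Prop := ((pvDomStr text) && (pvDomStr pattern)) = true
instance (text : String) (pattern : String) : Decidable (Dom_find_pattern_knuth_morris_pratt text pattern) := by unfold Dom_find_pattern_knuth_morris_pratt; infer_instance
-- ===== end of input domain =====

-- B replaces KMP (failure table + two stateful while-loops) by a plain brute-force
-- first-match scan: simpler code, same return value on every input (both are total).

-- ===== PORT A =====
-- first while-loop of A: failure-table construction.  The `min … (k-1)` clamp only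
-- serves termination; it never changes the value (fail[k-1] ≤ k-1 always holds).
def kmpFailLoop (p : List Char) (m : Nat) (fail : List Nat) (j k : Nat) : List Nat :=
  if _h : j < m then
    if p.getD j ' ' = p.getD k ' ' then
      kmpFailLoop p m (fail.set j (k + 1)) (j + 1) (k + 1)
    else if 0 < k then
      kmpFailLoop p m fail j (min (fail.getD (k - 1) 0) (k - 1))
    else
      kmpFailLoop p m fail (j + 1) k
  else fail
termination_by (m - j, k)
decreasing_by all_goals simp_wf; omega

-- second while-loop of A: the matcher (same clamp, for termination only).
def kmpSearchLoop (t p : List Char) (n m : Nat) (fail : List Nat) (j k : Nat) : Int :=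
  if _h : j < n then
    if t.getD j ' ' = p.getD k ' ' then
      if k = m - 1 then (j : Int) - (m : Int) + 1
      else kmpSearchLoop t p n m fail (j + 1) (k + 1)
    else if 0 < k then
      kmpSearchLoop t p n m fail j (min (fail.getD (k - 1) 0) (k - 1))
    else
      kmpSearchLoop t p n m fail (j + 1) k
  else -1
termination_by (n - j, k)
decreasing_by all_goals simp_wf; omega

def find_pattern_knuth_morris_pratt (text : String) (pattern : String) : Int :=
  let t := text.toList
  let p := pattern.toList
  let n := t.length
  let m := p.length
  if t.isEmpty || p.isEmpty then 0
  else kmpSearchLoop t p n m (kmpFailLoop p m (List.replicate m 0) 1 0) 0 0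

-- ===== PORT B =====
-- B's for-loop over the start indices; text[i:i+m] == pattern is (t.drop i).take m = p.
def bfLoop (t p : List Char) (m : Nat) (i N : Nat) : Int :=
  if i < N then
    if (t.drop i).take m = p then (i : Int) else bfLoop t p m (i + 1) N
  else -1
termination_by N - i

def find_pattern_knuth_morris_pratt_alt (text : String) (pattern : String) : Int :=
  let t := text.toList
  let p := pattern.toList
  if t.isEmpty || p.isEmpty then 0
  else bfLoop t p p.length 0 (t.length + 1 - p.length)

-- ===== PRECONDITION & SPEC =====
def Spec_find_pattern_knuth_morris_pratt (text : String) (pattern : String) (out : Int) : Prop := out = find_pattern_knuth_morris_pratt_alt text pattern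
instance (text : String) (pattern : String) (out : Int) : Decidable (Spec_find_pattern_knuth_morris_pratt text pattern out) := by unfold Spec_find_pattern_knuth_morris_pratt; infer_instance

-- ===== CLAIM (what is proved, stated in full; the proofs are below) =====
def Claim_equal_find_pattern_knuth_morris_pratt : Prop := ∀ (text : String) (pattern : String), Dom_find_pattern_knuth_morris_pratt text pattern → Spec_find_pattern_knuth_morris_pratt text pattern (find_pattern_knuth_morris_pratt text pattern)

-- ===== LEMMAS AND PROOFS =====

-- `b` is the length of a (proper) border of the prefix of `p` of length `j`,
-- stated pointwise through `getD`.
def PvBord (p : List Char) (j b : Nat) : Prop :=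
  b < j ∧ ∀ x, x < b → p.getD x ' ' = p.getD (j - b + x) ' '

-- entry i of the failure table is the LONGEST proper border of the prefix of length i+1
def PvGoodFail (p : List Char) (fail : List Nat) (i : Nat) : Prop :=
  PvBord p (i + 1) (fail.getD i 0) ∧ ∀ b, PvBord p (i + 1) b → b ≤ fail.getD i 0

lemma pv_getD_eq (l : List Char) (x : Nat) (h : x < l.length) : l.getD x ' ' = l[x] := by
  simp [List.getD_eq_getElem?_getD, List.getElem?_eq_getElem h]

lemma pv_getD_set_ne (fail : List Nat) (j i v : Nat) (h : j ≠ i) :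
    (fail.set j v).getD i 0 = fail.getD i 0 := by
  simp [List.getD_eq_getElem?_getD, List.getElem?_set_ne h]

lemma pv_getD_set_self (fail : List Nat) (j v : Nat) (h : j < fail.length) :
    (fail.set j v).getD j 0 = v := by
  simp [List.getD_eq_getElem?_getD, List.getElem?_set_self h]

-- the slice test of B, characterised pointwise
lemma pv_slice_eq (t p : List Char) (i : Nat) (hp : 0 < p.length) :
    ((t.drop i).take p.length = p) ↔
      (i + p.length ≤ t.length ∧ ∀ x, x < p.length → t.getD (i + x) ' ' = p.getD x ' ') := by
  constructor
  · intro h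
    have hlen := congrArg List.length h
    rw [List.length_take, List.length_drop] at hlen
    refine ⟨by omega, ?_⟩
    intro x hx
    have hx2 : x < ((t.drop i).take p.length).length := by
      rw [List.length_take, List.length_drop]; omega
    have := List.getElem_of_eq h (by simpa using hx2)
    rw [pv_getD_eq t (i + x) (by omega), pv_getD_eq p x hx]
    rw [← this]
    simp [List.getElem_take, List.getElem_drop]
  · rintro ⟨hle, hchar⟩
    have hlen : ((t.drop i).take p.length).length = p.length := by
      rw [List.length_take, List.length_drop]; omega
    apply List.ext_getElem hlen
    intro x h1 h2
    have := hchar x h2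
    rw [pv_getD_eq t (i + x) (by omega), pv_getD_eq p x h2] at this
    simpa [List.getElem_take, List.getElem_drop] using this

-- ----- correctness of the failure table -----
lemma pv_failLoop_good (p : List Char) (m : Nat) (hm : m = p.length) :
    ∀ μ fail j k, 2 * (m - j) + k ≤ μ → fail.length = m → 1 ≤ j → j ≤ m → k < j →
      (∀ x, x < k → p.getD x ' ' = p.getD (j - k + x) ' ') →
      (∀ b, PvBord p (j + 1) b → b ≤ k + 1) →
      (∀ i, i < j → PvGoodFail p fail i) →
      (∀ i, j ≤ i → fail.getD i 0 = 0) →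
      ∀ i, i < m → PvGoodFail p (kmpFailLoop p m fail j k) i := by
  intro μ
  induction μ with
  | zero =>
    intro fail j k hμ hlen hj1 hjm hkj hbord hub hdone hzero i him
    -- measure zero forces j = m and k = 0: the loop exits immediately
    have hje : ¬ j < m := by omega
    rw [kmpFailLoop, dif_neg hje]
    exact hdone i (by omega)
  | succ μ ih =>
    intro fail j k hμ hlen hj1 hjm hkj hbord hub hdone hzero i him
    rw [kmpFailLoop]
    by_cases hjlt : j < m
    · rw [dif_pos hjlt]
      by_cases hc : p.getD j ' ' = p.getD k ' '
      · rw [if_pos hc]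
        have hbord' : ∀ x, x < k + 1 → p.getD x ' ' = p.getD (j + 1 - (k + 1) + x) ' ' := by
          intro x hx
          have hidx : j + 1 - (k + 1) + x = j - k + x := by omega
          rw [hidx]
          by_cases hxk : x < k
          · exact hbord x hxk
          · have hxe : x = k := by omega
            subst hxe
            have hidx2 : j - x + x = j := by omega
            rw [hidx2]; exact hc.symm
        have hub' : ∀ b, PvBord p (j + 1 + 1) b → b ≤ k + 1 + 1 := by
          intro b hb
          rcases hb with ⟨hb1, hb2⟩
          by_cases hb0 : b = 0
          · omega
          · have : b - 1 ≤ k + 1 := by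
              apply hub
              refine ⟨by omega, ?_⟩
              intro x hx
              have := hb2 x (by omega)
              have hidx : j + 1 + 1 - b + x = j + 1 - (b - 1) + x := by omega
              rw [hidx] at this; exact this
            omega
        have hdone' : ∀ i', i' < j + 1 → PvGoodFail p (fail.set j (k + 1)) i' := by
          intro i' hi'
          by_cases hij : i' = j
          · subst hij
            unfold PvGoodFail
            rw [pv_getD_set_self fail i' (k + 1) (by omega)]
            exact ⟨⟨by omega, hbord'⟩, hub⟩
          · have hold := hdone i' (by omega)
            unfold PvGoodFail at hold ⊢
            rw [pv_getD_set_ne fail j i' (k + 1) (fun h => hij h.symm)]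
            exact hold
        have hzero' : ∀ i', j + 1 ≤ i' → (fail.set j (k + 1)).getD i' 0 = 0 := by
          intro i' hi'
          rw [pv_getD_set_ne fail j i' (k + 1) (by omega)]
          exact hzero i' (by omega)
        exact ih (fail.set j (k + 1)) (j + 1) (k + 1) (by omega)
          (by simpa using hlen) (by omega) (by omega) (by omega) hbord' hub' hdone' hzero' i him
      · rw [if_neg hc]
        by_cases hk : 0 < k
        · rw [if_pos hk]
          have hg := hdone (k - 1) (by omega)
          have hk1 : k - 1 + 1 = k := by omega
          unfold PvGoodFail at hg
          rw [hk1] at hg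
          set f := fail.getD (k - 1) 0 with hf
          have hfk : f < k := hg.1.1
          have hmin : min f (k - 1) = f := by omega
          rw [hmin]
          have hbord' : ∀ x, x < f → p.getD x ' ' = p.getD (j - f + x) ' ' := by
            intro x hx
            have h1 := hg.1.2 x hx
            have h2 := hbord (k - f + x) (by omega)
            have hidx : j - k + (k - f + x) = j - f + x := by omega
            rw [hidx] at h2
            exact h1.trans h2
          have hub' : ∀ b, PvBord p (j + 1) b → b ≤ f + 1 := by
            intro b hb
            rcases hb with ⟨hb1, hb2⟩
            by_cases hb0 : b = 0
            · omega
            · have hbk1 : b ≤ k + 1 := hub b ⟨hb1, hb2⟩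
              have hbk : b ≤ k := by
                by_contra hgt
                have hbe : b = k + 1 := by omega
                subst hbe
                have := hb2 k (by omega)
                have hidx : j + 1 - (k + 1) + k = j := by omega
                rw [hidx] at this
                exact hc this.symm
              have : b - 1 ≤ f := by
                apply hg.2
                refine ⟨by omega, ?_⟩
                intro x hx
                have h1 := hb2 x (by omega)
                have h2 := hbord (k - b + 1 + x) (by omega)
                have hidx : j - k + (k - b + 1 + x) = j + 1 - b + x := by omega
                rw [hidx] at h2
                have hidx2 : k - (b - 1) + x = k - b + 1 + x := by omega
                rw [hidx2]
                exact h1.trans h2.symm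
              omega
          exact ih fail j f (by omega) hlen hj1 hjm (by omega) hbord' hub' hdone hzero i him
        · rw [if_neg hk]
          have hk0 : k = 0 := by omega
          subst hk0
          have hub' : ∀ b, PvBord p (j + 1 + 1) b → b ≤ 0 + 1 := by
            intro b hb
            rcases hb with ⟨hb1, hb2⟩
            by_contra hgt
            rw [not_le] at hgt
            have hble : b - 1 ≤ 1 := by
              apply hub
              refine ⟨by omega, ?_⟩
              intro x hx
              have := hb2 x (by omega)
              have hidx : j + 1 + 1 - b + x = j + 1 - (b - 1) + x := by omega
              rw [hidx] at this; exact this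
            have hbe : b = 2 := by omega
            subst hbe
            have h0 := hb2 0 (by omega)
            have hidx : j + 1 + 1 - 2 + 0 = j := by omega
            rw [hidx] at h0
            exact hc h0.symm
          have hdone' : ∀ i', i' < j + 1 → PvGoodFail p fail i' := by
            intro i' hi'
            by_cases hij : i' = j
            · subst hij
              unfold PvGoodFail
              rw [hzero i' le_rfl]
              refine ⟨⟨by omega, by intro x hx; omega⟩, ?_⟩
              intro b hb
              rcases hb with ⟨hb1, hb2⟩
              by_contra hgt
              have hbe : b = 1 := by
                have := hub b ⟨hb1, hb2⟩
                omega
              subst hbe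
              have h0 := hb2 0 (by omega)
              have hidx : i' + 1 - 1 + 0 = i' := by omega
              rw [hidx] at h0
              exact hc h0.symm
            · exact hdone i' (by omega)
          exact ih fail (j + 1) 0 (by omega) hlen (by omega) (by omega) (by omega)
            (by intro x hx; omega) hub' hdone' (fun i' hi' => hzero i' (by omega)) i him
    · rw [dif_neg hjlt]
      exact hdone i (by omega)

-- ----- lemmas about B's scan -----
lemma pv_bf_none (t p : List Char) (m N : Nat) :
    ∀ μ lo, N - lo ≤ μ → (∀ i, lo ≤ i → (t.drop i).take m ≠ p) → bfLoop t p m lo N = -1 := by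
  intro μ
  induction μ with
  | zero =>
    intro lo hμ h
    rw [bfLoop, if_neg (by omega)]
  | succ μ ih =>
    intro lo hμ h
    rw [bfLoop]
    by_cases hlt : lo < N
    · rw [if_pos hlt, if_neg (h lo le_rfl)]
      exact ih (lo + 1) (by omega) (fun i hi => h i (by omega))
    · rw [if_neg hlt]

lemma pv_bf_skip (t p : List Char) (m N lo : Nat) (h : (t.drop lo).take m ≠ p) :
    bfLoop t p m lo N = bfLoop t p m (lo + 1) N := by
  rw [bfLoop]
  by_cases hlt : lo < N
  · rw [if_pos hlt, if_neg h]
  · rw [if_neg hlt, bfLoop, if_neg (by omega)]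

lemma pv_bf_congr (t p : List Char) (m N : Nat) :
    ∀ d lo, (∀ i, lo ≤ i → i < lo + d → (t.drop i).take m ≠ p) →
      bfLoop t p m lo N = bfLoop t p m (lo + d) N := by
  intro d
  induction d with
  | zero => intro lo _; rfl
  | succ d ih =>
    intro lo h
    rw [pv_bf_skip t p m N lo (h lo le_rfl (by omega))]
    have := ih (lo + 1) (fun i hi1 hi2 => h i (by omega) (by omega))
    rw [this]
    congr 1
    omega

lemma pv_bf_hit (t p : List Char) (m N lo : Nat) (hlt : lo < N) (h : (t.drop lo).take m = p) :
    bfLoop t p m lo N = (lo : Int) := by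
  rw [bfLoop, if_pos hlt, if_pos h]

-- ----- the matcher agrees with the brute-force scan -----
lemma pv_kmp_eq_bf (t p : List Char) (n m N : Nat) (fail : List Nat)
    (hn : n = t.length) (hm : m = p.length) (hm1 : 1 ≤ m) (hN : N = n + 1 - m)
    (hgood : ∀ i, i < m → PvGoodFail p fail i) :
    ∀ μ j k, 2 * (n - j) + k ≤ μ → j ≤ n → k < m → k ≤ j →
      (∀ x, x < k → t.getD (j - k + x) ' ' = p.getD x ' ') →
      kmpSearchLoop t p n m fail j k = bfLoop t p m (j - k) N := by
  have hexit : ∀ j k, j = n → k < m → k ≤ j → kmpSearchLoop t p n m fail j k = bfLoop t p m (j - k) N := by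
    intro j k hje hkm hkj
    rw [kmpSearchLoop, dif_neg (by omega)]
    symm
    apply pv_bf_none t p m N (N - (j - k))
    · omega
    · intro i hi hs
      have hocc := (pv_slice_eq t p i (by omega)).mp (by rw [← hm]; exact hs)
      omega
  intro μ
  induction μ with
  | zero =>
    intro j k hμ hjn hkm hkj hmatch
    exact hexit j k (by omega) hkm hkj
  | succ μ ih =>
    intro j k hμ hjn hkm hkj hmatch
    by_cases hjlt : j < n
    · rw [kmpSearchLoop, dif_pos hjlt]
      by_cases hc : t.getD j ' ' = p.getD k ' '
      · rw [if_pos hc]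
        by_cases hkm1 : k = m - 1
        · rw [if_pos hkm1]
          -- full match found at j - k; it is in range, B hits it too
          have hs : (t.drop (j - k)).take m = p := by
            rw [hm]
            apply (pv_slice_eq t p (j - k) (by omega)).mpr
            refine ⟨by omega, ?_⟩
            intro x hx
            rw [← hm] at hx
            by_cases hxk : x < k
            · exact hmatch x hxk
            · have hxe : x = k := by omega
              subst hxe
              have hidx : j - x + x = j := by omega
              rw [hidx]; exact hc
          rw [pv_bf_hit t p m N (j - k) (by omega) hs]
          omega
        · rw [if_neg hkm1]
          have hstep := ih (j + 1) (k + 1) (by omega) (by omega) (by omega) (by omega) ?_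
          · rw [hstep]
            congr 1
            omega
          · intro x hx
            have hidx : j + 1 - (k + 1) + x = j - k + x := by omega
            rw [hidx]
            by_cases hxk : x < k
            · exact hmatch x hxk
            · have hxe : x = k := by omega
              subst hxe
              have hidx2 : j - x + x = j := by omega
              rw [hidx2]; exact hc
      · rw [if_neg hc]
        by_cases hk : 0 < k
        · rw [if_pos hk]
          have hg := hgood (k - 1) (by omega)
          have hk1 : k - 1 + 1 = k := by omega
          unfold PvGoodFail at hg
          rw [hk1] at hg
          set f := fail.getD (k - 1) 0 with hf
          have hfk : f < k := hg.1.1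
          have hmin : min f (k - 1) = f := by omega
          rw [hmin]
          have hstep := ih j f (by omega) (by omega) (by omega) (by omega) ?_
          · rw [hstep]
            -- B skips every start index between j-k and j-f: none of them matches
            have hno : ∀ i, j - k ≤ i → i < (j - k) + (k - f) → (t.drop i).take m ≠ p := by
              intro i hi1 hi2 hs
              have hocc := (pv_slice_eq t p i (by omega)).mp (by rw [← hm]; exact hs)
              rcases hocc with ⟨hocc1, hocc2⟩
              set b := j - i with hb
              have hbk : b ≤ k := by omega
              have hbf : f < b := by omega
              by_cases hbe : b = k
              · -- a match starting at j-k would need t[j] = p[k]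
                have h1 := hocc2 k (by omega)
                have hidx : i + k = j := by omega
                rw [hidx] at h1
                exact hc h1
              · -- otherwise b is a border of the k-prefix longer than fail[k-1]
                have hbord_b : PvBord p k b := by
                  refine ⟨by omega, ?_⟩
                  intro x hx
                  have h1 := hocc2 x (by omega)
                  have h2 := hmatch (k - b + x) (by omega)
                  have hidx : j - k + (k - b + x) = i + x := by omega
                  rw [hidx] at h2
                  rw [← h1]
                  exact h2
                have := hg.2 b hbord_b
                omega
            have := pv_bf_congr t p m N (k - f) (j - k) hno
            rw [this]
            congr 1
            omega
          · intro x hx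
            have h1 := hg.1.2 x hx
            have h2 := hmatch (k - f + x) (by omega)
            have hidx : j - k + (k - f + x) = j - f + x := by omega
            rw [hidx] at h2
            rw [h2, ← h1]
        · rw [if_neg hk]
          have hk0 : k = 0 := by omega
          subst hk0
          have hstep := ih (j + 1) 0 (by omega) (by omega) (by omega) (by omega) (by intro x hx; omega)
          rw [hstep]
          have hskip : (t.drop j).take m ≠ p := by
            intro hs
            have hocc := (pv_slice_eq t p j (by omega)).mp (by rw [← hm]; exact hs)
            rcases hocc with ⟨hocc1, hocc2⟩
            have h1 := hocc2 0 (by omega)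
            have hidx : j + 0 = j := by omega
            rw [hidx] at h1
            have hidx2 : j - 0 = j := by omega
            exact hc (by simpa using h1)
          have := pv_bf_skip t p m N j hskip
          simp only [Nat.sub_zero]
          rw [this]
    · exact hexit j k (by omega) hkm hkj

-- ===== VERDICT (by name: the statement is the Claim_ definition above) =====
theorem find_pattern_knuth_morris_pratt_spec : Claim_equal_find_pattern_knuth_morris_pratt := by
  unfold Claim_equal_find_pattern_knuth_morris_pratt Spec_find_pattern_knuth_morris_pratt
  intro text pattern _
  unfold find_pattern_knuth_morris_pratt find_pattern_knuth_morris_pratt_alt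
  by_cases he : text.toList.isEmpty || pattern.toList.isEmpty
  · simp only [he, if_pos]
  · simp only [he, if_neg, Bool.false_eq_true, not_false_iff]
    have hpe : pattern.toList ≠ [] := by
      intro h; apply he; simp [h]
    have hm1 : 1 ≤ pattern.toList.length := by
      cases hp : pattern.toList with
      | nil => exact absurd hp hpe
      | cons a l => simp
    have hgood : ∀ i, i < pattern.toList.length →
        PvGoodFail pattern.toList
          (kmpFailLoop pattern.toList pattern.toList.length (List.replicate pattern.toList.length 0) 1 0) i := by
      have h00 : (List.replicate pattern.toList.length (0 : Nat)).getD 0 0 = 0 := by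
        rw [List.getD_eq_getElem?_getD, List.getElem?_replicate_of_lt (by omega)]
        rfl
      apply pv_failLoop_good pattern.toList pattern.toList.length rfl
        (2 * pattern.toList.length) _ 1 0 (by omega) (by simp) (by omega) (by omega) (by omega)
        (by intro x hx; omega)
      · intro b hb
        have := hb.1
        omega
      · intro i hi
        have hie : i = 0 := by omega
        subst hie
        unfold PvGoodFail
        rw [h00]
        constructor
        · refine ⟨by omega, ?_⟩
          intro x hx; omega
        · intro b hb
          have := hb.1
          omega
      · intro i' hi'
        by_cases h : i' < pattern.toList.length
        · rw [List.getD_eq_getElem?_getD, List.getElem?_replicate_of_lt h]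
          rfl
        · rw [List.getD_eq_getElem?_getD, List.getElem?_eq_none (by simpa using h)]
          rfl
    have := pv_kmp_eq_bf text.toList pattern.toList text.toList.length pattern.toList.length
      (text.toList.length + 1 - pattern.toList.length)
      (kmpFailLoop pattern.toList pattern.toList.length (List.replicate pattern.toList.length 0) 1 0)
      rfl rfl hm1 rfl hgood (2 * text.toList.length) 0 0 (by omega) (by omega) (by omega) (by omega)
      (by intro x hx; omega)
    simpa using this
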